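-- pv_equiv track=rewrite | github.com/salessandri/programming-contests | project-euler/problem231.py | get_factorisation
-- ===== SOURCE A (Python) =====
-- def get_factorisation(n, k):
--     r = {}
--     not_p = set()
--     tope_1 = min(n-k, k) + 1
--     tope_2 = max(n-k, k) + 1
--     for i in range(2, n+1):
--         if i not in not_p:
--             if i < tope_1:
--                 r[i] = -i
--             elif i < tope_2:
--                 r[i] = 0
--             else:
--                 r[i] = i
--             for j in range(i*2, n+1, i):
--                 not_p.add(j)
--                 if j < tope_1:
--                     mult = -1
--                 elif j >= tope_2:
--                     mult = 1
--                 else: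
--                     continue
--                 cant = 0
--                 d, rest = divmod(j, i)
--                 while not rest:
--                     cant += 1
--                     d, rest = divmod(d, i)
--                 r[i] += mult * cant * i
--             if r[i] == 0:
--                 del r[i]
--     return r
-- ===== SOURCE B (Python) =====
-- def _legendre(m, p):
--     s = 0
--     while m:
--         m //= p
--         s += m
--     return s
--
--
-- def get_factorisation(n, k):
--     r = {}
--     if n < 2 or k < 0 or k > n:
--         return r
--     lo = min(n - k, k)
--     hi = max(n - k, k)
--     composite = set()
--     for p in range(2, n + 1):
--         if p in composite:
--             continue
--         e = _legendre(n, p) - _legendre(hi, p) - _legendre(lo, p)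
--         if e:
--             r[p] = p * e
--         for j in range(p * p, n + 1, p):
--             composite.add(j)
--     return r
-- ===== Notes on version B (the rewrite author's own statement) =====
-- stated objective: faster
-- what changed: A accumulates each prime's signed valuation contributions by walking every multiple of every prime and dividing out its valuation; B sieves the primes once (marking from p*p) and computes each exponent directly with Legendre's formula e_p = L(n) - L(max(n-k,k)) - L(min(n-k,k)), L(m) = sum of m//p^t, returning {} up front when k is outside [0, n].
import Mathlib
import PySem

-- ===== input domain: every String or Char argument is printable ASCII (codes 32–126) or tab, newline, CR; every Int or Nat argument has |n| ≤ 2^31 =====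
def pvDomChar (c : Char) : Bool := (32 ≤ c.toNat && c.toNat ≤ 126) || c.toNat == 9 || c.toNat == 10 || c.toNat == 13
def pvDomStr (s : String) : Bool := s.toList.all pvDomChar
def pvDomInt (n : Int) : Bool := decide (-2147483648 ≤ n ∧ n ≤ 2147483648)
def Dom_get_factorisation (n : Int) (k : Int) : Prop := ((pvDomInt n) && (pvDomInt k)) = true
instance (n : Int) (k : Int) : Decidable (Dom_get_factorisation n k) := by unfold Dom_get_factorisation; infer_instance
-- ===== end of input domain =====

-- B replaces A's per-multiple signed accumulation of prime valuations by Legendre's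
-- formula per sieve-surviving prime (objective: faster; measured).

-- ===== PORT A =====

-- the 'while not rest: cant += 1; d, rest = divmod(d, i)' loop of A; i ≥ 2 at every
-- call site, so divmod never raises and the loop always terminates; the fuel
-- (j.natAbs + 2 at the call site) strictly exceeds the number of iterations.
def pvCantGo (i d rest cant : Int) : Nat → Int
  | 0 => cant
  | fuel+1 => if rest = 0 then pvCantGo i (PySem.Int.floordiv d i) (PySem.Int.mod d i) (cant + 1) fuel else cant

-- 'cant = 0; d, rest = divmod(j, i); while not rest: …' of A
def pvCant (i j : Int) : Int :=
  pvCantGo i (PySem.Int.floordiv j i) (PySem.Int.mod j i) 0 (j.natAbs + 2)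

def get_factorisation (n : Int) (k : Int) : List (Int × Int) :=
  let tope_1 := min (n - k) k + 1
  let tope_2 := max (n - k) k + 1
  let st :=
    (PySem.List.pyRange 2 (n+1) 1).foldl (fun (st : PySem.Dict Int Int × PySem.Set Int) i =>
      if st.2.contains i then st
      else
        let r := st.1.insert i (if i < tope_1 then -i else if i < tope_2 then 0 else i)
        let st2 :=
          (PySem.List.pyRange (i*2) (n+1) i).foldl
            (fun (st2 : PySem.Dict Int Int × PySem.Set Int) j =>
              let np := st2.2.add j
              if j < tope_1 then (st2.1.modify i 0 (· + (-1) * pvCant i j * i), np)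
              else if tope_2 ≤ j then (st2.1.modify i 0 (· + 1 * pvCant i j * i), np)
              else (st2.1, np))
            (r, st.2)
        -- 'if r[i] == 0: del r[i]' — key i is always present here, so r[i] is r.getD i 0
        if st2.1.getD i 0 = 0 then (st2.1.erase i, st2.2) else st2)
      (PySem.Dict.empty, PySem.Set.empty)
  st.1.items

-- ===== PORT B =====

-- the 'while m: m //= p; s += m' loop of B; p ≥ 2 and m ≥ 0 at every call site, so
-- the loop terminates and the fuel (m.natAbs + 1) exceeds the number of iterations.
def pvLegGo (p m s : Int) : Nat → Int
  | 0 => s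
  | fuel+1 => if m = 0 then s else pvLegGo p (PySem.Int.floordiv m p) (s + PySem.Int.floordiv m p) fuel

def pvLegendre (m p : Int) : Int := pvLegGo p m 0 (m.natAbs + 1)

def get_factorisation_alt (n : Int) (k : Int) : List (Int × Int) :=
  if n < 2 ∨ k < 0 ∨ n < k then []
  else
    let lo := min (n - k) k
    let hi := max (n - k) k
    let st :=
      (PySem.List.pyRange 2 (n+1) 1).foldl (fun (st : PySem.Dict Int Int × PySem.Set Int) p =>
        if st.2.contains p then st
        else
          let e := pvLegendre n p - pvLegendre hi p - pvLegendre lo p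
          let r := if e ≠ 0 then st.1.insert p (p * e) else st.1
          let comp := (PySem.List.pyRange (p*p) (n+1) p).foldl (fun s j => PySem.Set.add s j) st.2
          (r, comp))
        (PySem.Dict.empty, PySem.Set.empty)
    st.1.items

-- ===== PRECONDITION & SPEC =====
def Spec_get_factorisation (n : Int) (k : Int) (out : List (Int × Int)) : Prop := out = get_factorisation_alt n k
instance (n : Int) (k : Int) (out : List (Int × Int)) : Decidable (Spec_get_factorisation n k out) := by unfold Spec_get_factorisation; infer_instance

-- ===== CLAIM (what is proved, stated in full; the proofs are below) =====
def Claim_equal_get_factorisation : Prop := ∀ (n : Int) (k : Int), Dom_get_factorisation n k → Spec_get_factorisation n k (get_factorisation n k)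

-- ===== LEMMAS AND PROOFS =====

def vN (p m : Nat) : Nat :=
  if h : 2 ≤ p ∧ 0 < m ∧ p ∣ m then vN p (m / p) + 1 else 0
decreasing_by exact Nat.div_lt_self h.2.1 h.1
def sN (p B : Nat) : Nat := ∑ m ∈ Finset.Icc 1 B, vN p m
def lN (p m : Nat) : Nat :=
  if h : 2 ≤ p ∧ 0 < m then m / p + lN p (m / p) else 0
decreasing_by exact Nat.div_lt_self h.2 h.1
theorem vN_of_dvd {p m : Nat} (hp : 2 ≤ p) (hm : 0 < m) (hd : p ∣ m) :
    vN p m = vN p (m / p) + 1 := by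
  rw [vN]; simp [hp, hm, hd]

theorem vN_of_not_dvd {p m : Nat} (hd : ¬ p ∣ m) : vN p m = 0 := by
  rw [vN]; simp [hd]

theorem lN_pos {p m : Nat} (hp : 2 ≤ p) (hm : 0 < m) : lN p m = m / p + lN p (m / p) := by
  rw [lN]; simp [hp, hm]

theorem lN_zero (p : Nat) : lN p 0 = 0 := by rw [lN]; simp

theorem fdiv_cast (M P : Nat) : (PySem.Int.floordiv (M:Int) (P:Int)) = ((M / P : Nat) : Int) := by
  show ((M:Int)).fdiv (P:Int) = ((M / P : Nat) : Int)
  rw [Int.fdiv_eq_ediv]; push_cast; simp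

theorem mod_cast_nat (M P : Nat) : (PySem.Int.mod (M:Int) (P:Int)) = ((M % P : Nat) : Int) := by
  show Int.fmod _ _ = _
  rw [Int.fmod_eq_emod]; push_cast; rfl

theorem pvLegGo_eq (p : Nat) (hp : 2 ≤ p) :
    ∀ (fuel : Nat) (m : Nat) (s : Int), m < fuel →
      pvLegGo (p:Int) (m:Int) s fuel = s + (lN p m : Int) := by
  intro fuel
  induction fuel with
  | zero => intro m s h; omega
  | succ f ih =>
    intro m s h
    rw [pvLegGo]
    by_cases hm : m = 0
    · subst hm; simp [lN_zero]
    · have h0 : 0 < m := Nat.pos_of_ne_zero hm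
      have hlt : m / p < m := Nat.div_lt_self h0 hp
      simp only [show ((m:Int) = 0) ↔ False by simp [hm], if_false]
      rw [fdiv_cast, ih (m / p) _ (by omega), lN_pos hp h0]
      push_cast; ring

theorem pvLegendre_eq (m p : Nat) (hp : 2 ≤ p) :
    pvLegendre (m:Int) (p:Int) = (lN p m : Int) := by
  have := pvLegGo_eq p hp (m + 1) m 0 (by omega)
  simpa [pvLegendre] using this

theorem lN_succ (p : Nat) (hp : 2 ≤ p) : ∀ m : Nat, lN p (m+1) = lN p m + vN p (m+1) := by
  intro m
  induction m using Nat.strong_induction_on with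
  | _ m ih =>
    by_cases hd : p ∣ (m+1)
    · have hq1 : 1 ≤ (m+1)/p := (Nat.one_le_div_iff (by omega)).2 (Nat.le_of_dvd (by omega) hd)
      have hm0 : 0 < m := by
        by_contra hcon
        have hme : m = 0 := by omega
        subst hme; have := Nat.le_of_dvd one_pos hd; omega
      set q := (m+1)/p with hqdef
      have hmp : m / p = q - 1 := by
        have := Nat.succ_div (a := m) (b := p); rw [if_pos hd] at this; omega
      have hqm : q - 1 < m := by
        have : q * 1 ≤ q * p := Nat.mul_le_mul_left q (by omega)
        have h2 : q * p ≤ m + 1 := by rw [hqdef]; exact Nat.div_mul_le_self _ _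
        have h3 : 2 * q ≤ q * p := by rw [Nat.mul_comm]; exact Nat.mul_le_mul_left q hp
        omega
      have ihq : lN p q = lN p (q-1) + vN p q := by
        have := ih (q-1) (by omega)
        rwa [Nat.sub_add_cancel hq1] at this
      rw [lN_pos hp (by omega : 0 < m + 1), ← hqdef, lN_pos hp hm0, hmp,
        vN_of_dvd hp (by omega) hd, ← hqdef, ihq]
      omega
    · have hv : vN p (m+1) = 0 := vN_of_not_dvd hd
      have hmp : (m+1) / p = m / p := by
        have := Nat.succ_div (a := m) (b := p); rw [if_neg hd] at this; omega
      by_cases hm : m = 0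
      · subst hm; rw [lN_pos hp (by omega), hmp, hv]; simp [lN_zero]
      · rw [lN_pos hp (by omega : 0 < m+1), hmp, lN_pos hp (Nat.pos_of_ne_zero hm), hv]
        omega

theorem lN_eq_sN (p : Nat) (hp : 2 ≤ p) (B : Nat) : lN p B = sN p B := by
  induction B with
  | zero => simp [lN_zero, sN]
  | succ b ih =>
    rw [lN_succ p hp b, ih, sN, sN, Finset.sum_Icc_succ_top (by omega)]

theorem pvCantGo_stop (i d rest c : Int) (h : rest ≠ 0) :
    ∀ f, pvCantGo i d rest c f = c := by
  intro f; cases f <;> simp [pvCantGo, h]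

theorem pvCantGo_eq (p : Nat) (hp : 2 ≤ p) :
    ∀ (fuel : Nat) (d : Nat) (cant : Int), 0 < d → d < fuel →
      pvCantGo (p:Int) (d:Int) 0 cant fuel = cant + 1 + (vN p d : Int) := by
  intro fuel
  induction fuel with
  | zero => intro d cant h1 h2; omega
  | succ f ih =>
    intro d cant h1 h2
    rw [pvCantGo, if_pos rfl, fdiv_cast, mod_cast_nat]
    by_cases hd : p ∣ d
    · have hmod : d % p = 0 := Nat.dvd_iff_mod_eq_zero.mp hd
      have hq1 : 0 < d / p := Nat.div_pos (Nat.le_of_dvd h1 hd) (by omega)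
      have hlt : d / p < d := Nat.div_lt_self h1 hp
      rw [hmod, Nat.cast_zero]
      rw [ih (d / p) (cant + 1) hq1 (by omega), vN_of_dvd hp h1 hd]
      push_cast; ring
    · have hmod : d % p ≠ 0 := fun h => hd (Nat.dvd_of_mod_eq_zero h)
      rw [pvCantGo_stop _ _ _ _ (by exact_mod_cast hmod), vN_of_not_dvd hd]
      simp

theorem pvCant_eq (p j : Nat) (hp : 2 ≤ p) (hj : 0 < j) (hd : p ∣ j) :
    pvCant (p:Int) (j:Int) = (vN p j : Int) := by
  have hmod : j % p = 0 := Nat.dvd_iff_mod_eq_zero.mp hd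
  have hq1 : 0 < j / p := Nat.div_pos (Nat.le_of_dvd hj hd) (by omega)
  have hlt : j / p < j := Nat.div_lt_self hj hp
  have hna : (j:Int).natAbs = j := Int.natAbs_natCast j
  rw [pvCant, fdiv_cast, mod_cast_nat, hmod, hna, Nat.cast_zero]
  rw [pvCantGo_eq p hp (j+2) (j/p) 0 hq1 (by omega), vN_of_dvd hp hj hd]
  push_cast; ring

theorem sN_zero (p : Nat) : sN p 0 = 0 := by simp [sN]

theorem sN_succ (p B : Nat) : sN p (B+1) = sN p B + vN p (B+1) := by
  rw [sN, sN, Finset.sum_Icc_succ_top (by omega)]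

theorem sN_eq_sum_multiples (p : Nat) (_hp : 2 ≤ p) (B : Nat) :
    sN p B = ∑ m ∈ Finset.Icc 1 (B / p), vN p (p * m) := by
  induction B with
  | zero => simp [sN_zero]
  | succ b ih =>
    rw [sN_succ, ih]
    by_cases hd : p ∣ (b+1)
    · have hq : (b+1)/p = b/p + 1 := by
        have := Nat.succ_div (a := b) (b := p); rw [if_pos hd] at this; omega
      have hmul : p * (b/p + 1) = b + 1 := by rw [← hq, Nat.mul_div_cancel' hd]
      rw [hq, Finset.sum_Icc_succ_top (a := 1) (b := b/p) (Nat.succ_le_succ (Nat.zero_le _)), hmul]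
    · have hq : (b+1)/p = b/p := by
        have := Nat.succ_div (a := b) (b := p); rw [if_neg hd] at this; omega
      rw [hq, vN_of_not_dvd hd]
      simp

theorem sum_trunc (p : Nat) (hp : 2 ≤ p) (N B : Nat) (hB : B ≤ N) :
    (∑ m ∈ Finset.Icc 1 (N / p), if p * m ≤ B then (vN p (p * m) : Int) else 0)
      = (sN p B : Int) := by
  rw [← Finset.sum_filter]
  have hset : (Finset.Icc 1 (N / p)).filter (fun m => p * m ≤ B) = Finset.Icc 1 (B / p) := by
    ext m
    simp only [Finset.mem_filter, Finset.mem_Icc]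
    constructor
    · rintro ⟨⟨h1, _⟩, h3⟩
      exact ⟨h1, (Nat.le_div_iff_mul_le (by omega)).2 (Nat.mul_comm p m ▸ h3)⟩
    · rintro ⟨h1, h2⟩
      have h3 : m * p ≤ B := (Nat.le_div_iff_mul_le (by omega)).1 h2
      have h4 : B / p ≤ N / p := Nat.div_le_div_right hB
      exact ⟨⟨h1, le_trans h2 h4⟩, Nat.mul_comm m p ▸ h3⟩
  rw [hset, sN_eq_sum_multiples p hp B]
  push_cast; rfl

def hF (p t1 t2 j : Int) : Int :=
  if j < t1 then (-1) * pvCant p j * p else if t2 ≤ j then 1 * pvCant p j * p else 0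

def valA (n k p : Int) : Int :=
  let t1 := min (n - k) k + 1
  let t2 := max (n - k) k + 1
  (if p < t1 then -p else if p < t2 then 0 else p) +
    ((PySem.List.pyRange (p*2) (n+1) p).map (hF p t1 t2)).sum

theorem vN_self (P : Nat) (hp : 2 ≤ P) : vN P P = 1 := by
  rw [vN_of_dvd hp (by omega) dvd_rfl, Nat.div_self (by omega),
    vN_of_not_dvd (fun h => by have := Nat.le_of_dvd one_pos h; omega)]

theorem list_range_sum (n : Nat) (f : Nat → Int) :
    ((List.range n).map f).sum = ∑ i ∈ Finset.range n, f i := rfl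

theorem sub_div_self_eq (N P : Nat) (hp : 2 ≤ P) (h2 : P*2 ≤ N) : (N - P) / P = N / P - 1 := by
  have hmod := Nat.div_add_mod N P
  have hrlt : N % P < P := Nat.mod_lt _ (by omega)
  have hq2 : 2 ≤ N / P := (Nat.le_div_iff_mul_le (by omega)).2 (by omega)
  have hEq : N - P = P * (N / P - 1) + N % P := by
    have : P * (N / P - 1) = P * (N / P) - P := by
      rw [Nat.mul_sub, Nat.mul_one]
    omega
  rw [hEq, Nat.mul_add_div (by omega), Nat.div_eq_of_lt hrlt]
  omega

theorem count_eq (N P : Nat) (hp : 2 ≤ P) (hpn : P ≤ N) :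
    (if (P:Int)*2 < (N:Int)+1 then (((N:Int)+1 - (P:Int)*2 + (P:Int) - 1)/(P:Int)).toNat else 0)
      = N / P - 1 := by
  by_cases hc : (P:Int)*2 < (N:Int)+1
  · rw [if_pos hc]
    have h2 : P*2 ≤ N := by exact_mod_cast by omega
    have hnum : ((N:Int)+1 - (P:Int)*2 + (P:Int) - 1) = ((N - P : Nat) : Int) := by
      push_cast [show P ≤ N by omega]; ring
    rw [hnum, show ((N - P : Nat) : Int) / (P:Int) = (((N-P)/P : Nat) : Int) by push_cast; simp]
    rw [Int.toNat_natCast, sub_div_self_eq N P hp h2]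
  · rw [if_neg hc]
    have h2 : N < P*2 := by exact_mod_cast by omega
    have : N / P = 1 := Nat.div_eq_of_lt_le (by omega) (by omega)
    omega
theorem valA_closed' (N K P : Nat) (_hn : 2 ≤ N) (hkn : K ≤ N) (hp2 : 2 ≤ P) (hpn : P ≤ N) :
    valA (N:Int) (K:Int) (P:Int)
      = (P:Int) * ((sN P N : Int) - (sN P (max (N-K) K) : Int) - (sN P (min (N-K) K) : Int)) := by
  set LO := min (N-K) K with hLOdef
  set HI := max (N-K) K with hHIdef
  have hLOHI : LO ≤ HI := min_le_max
  have hHIN : HI ≤ N := by simp [hHIdef]; omega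
  have hLON : LO ≤ N := le_trans hLOHI hHIN
  have hsub : ((N:Int) - (K:Int)) = ((N - K : Nat) : Int) := by push_cast [hkn]; ring
  have hmin : min ((N:Int) - (K:Int)) (K:Int) = ((LO : Nat) : Int) := by
    rw [hsub, hLOdef]; push_cast; rfl
  have hmax : max ((N:Int) - (K:Int)) (K:Int) = ((HI : Nat) : Int) := by
    rw [hsub, hHIdef]; push_cast; rfl
  have h0p : (0:Int) < (P:Int) := by exact_mod_cast (by omega : 0 < P)
  set M := N / P with hMdef
  have hM1 : 1 ≤ M := (Nat.le_div_iff_mul_le (by omega)).2 (by omega)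
  -- the inner-loop contribution as a function of the multiplier m
  set F : Nat → Int := fun m => hF (P:Int) ((LO:Int)+1) ((HI:Int)+1) ((P:Int) * (m:Int)) with hFdef
  have hrange : ((PySem.List.pyRange ((P:Int)*2) ((N:Int)+1) (P:Int)).map
        (hF (P:Int) ((LO:Int)+1) ((HI:Int)+1))).sum = ∑ m ∈ Finset.Icc 1 M, F m - F 1 := by
    rw [PySem.List.pyRange_of_pos _ _ h0p, count_eq N P hp2 hpn, List.map_map, list_range_sum]
    have hstep : ∀ t ∈ Finset.range (M - 1),
        (hF (P:Int) ((LO:Int)+1) ((HI:Int)+1) ∘ fun k : Nat => (P:Int)*2 + (P:Int)*(k:Int)) t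
          = F (2 + t) := by
      intro t _
      simp only [Function.comp, hFdef]
      congr 1
      push_cast; ring
    rw [Finset.sum_congr rfl hstep, show M - 1 = M + 1 - 2 by omega,
      ← Finset.sum_Ico_eq_sum_range F 2 (M+1)]
    have hicc : Finset.Icc 1 M = Finset.Ico 1 (M+1) := by
      ext x; simp
    rw [hicc, Finset.sum_eq_sum_Ico_succ_bot (a := 1) (b := M+1) (by omega) F]
    ring
  -- the initial assignment r[p] = … is exactly the m = 1 term
  have hinit : (if (P:Int) < (LO:Int)+1 then -(P:Int) else if (P:Int) < (HI:Int)+1 then 0 else (P:Int)) = F 1 := by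
    have hc : pvCant (P:Int) (P:Int) = ((vN P P : Nat) : Int) := by
      exact_mod_cast pvCant_eq P P hp2 (by omega) dvd_rfl
    simp only [hFdef, hF, Nat.cast_one, mul_one, hc, vN_self P hp2]
    split_ifs <;> omega
  -- pointwise rewrite of F on Icc 1 M
  have hpoint : ∀ m ∈ Finset.Icc 1 M,
      F m = (P:Int) * ((if HI < P*m then ((vN P (P*m) : Nat) : Int) else 0)
                       - (if P*m ≤ LO then ((vN P (P*m) : Nat) : Int) else 0)) := by
    intro m hm
    simp only [Finset.mem_Icc] at hm
    have hc : pvCant (P:Int) ((P:Int) * (m:Int)) = ((vN P (P*m) : Nat) : Int) := by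
      rw [show ((P:Int) * (m:Int)) = ((P*m : Nat) : Int) by push_cast; ring]
      exact pvCant_eq P (P*m) hp2 (Nat.mul_pos (by omega) (by omega)) ⟨m, rfl⟩
    simp only [hFdef, hF, hc]
    have hb1 : ((P:Int) * (m:Int) < (LO:Int)+1) ↔ P*m ≤ LO := by
      rw [show ((P:Int) * (m:Int)) = ((P*m : Nat) : Int) by push_cast; ring]
      push_cast; omega
    have hb2 : ((HI:Int)+1 ≤ (P:Int) * (m:Int)) ↔ HI < P*m := by
      rw [show ((P:Int) * (m:Int)) = ((P*m : Nat) : Int) by push_cast; ring]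
      push_cast; omega
    by_cases h1 : P*m ≤ LO
    · rw [if_pos (hb1.2 h1), if_pos h1, if_neg (by omega)]
      ring
    · rw [if_neg (fun hh => h1 (hb1.1 hh))]
      by_cases h2 : HI < P*m
      · rw [if_pos (hb2.2 h2), if_pos h2, if_neg h1]; ring
      · rw [if_neg (fun hh => h2 (hb2.1 hh)), if_neg h2, if_neg h1]; ring
  have hfull : (∑ m ∈ Finset.Icc 1 M, ((vN P (P*m) : Nat) : Int)) = (sN P N : Int) := by
    rw [hMdef]
    rw [show ((sN P N : Nat) : Int) = ((∑ m ∈ Finset.Icc 1 (N/P), vN P (P*m) : Nat) : Int) by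
      rw [sN_eq_sum_multiples P hp2 N]]
    push_cast; rfl
  have hsum : ∑ m ∈ Finset.Icc 1 M, F m
      = (P:Int) * ((sN P N : Int) - (sN P HI : Int) - (sN P LO : Int)) := by
    rw [Finset.sum_congr rfl hpoint, ← Finset.mul_sum, Finset.sum_sub_distrib]
    have hA1 : ∀ m ∈ Finset.Icc 1 M,
        (if HI < P*m then ((vN P (P*m) : Nat) : Int) else 0)
          = ((vN P (P*m) : Nat) : Int) - (if P*m ≤ HI then ((vN P (P*m) : Nat) : Int) else 0) := by
      intro m _
      by_cases h : HI < P*m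
      · rw [if_pos h, if_neg (by omega)]; ring
      · rw [if_neg h, if_pos (by omega)]; ring
    rw [Finset.sum_congr rfl hA1, Finset.sum_sub_distrib, hfull, hMdef,
      sum_trunc P hp2 N HI hHIN, sum_trunc P hp2 N LO hLON]
  simp only [valA, hmin, hmax, hrange, hinit, hsum]
  ring

theorem find?_append_fresh {xs : List (Int × Int)} {i v : Int}
    (h : ∀ x ∈ xs, x.1 ≠ i) :
    (xs ++ [(i, v)]).find? (fun p => p.1 == i) = some (i, v) := by
  rw [List.find?_append]
  have h1 : xs.find? (fun p => p.1 == i) = none := by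
    rw [List.find?_eq_none]
    intro x hx; simpa using h x hx
  rw [h1]; simp

theorem getD_append_fresh (d : PySem.Dict Int Int) (xs : List (Int × Int)) (i v : Int)
    (hits : d.items = xs ++ [(i, v)]) (h : ∀ x ∈ xs, x.1 ≠ i) :
    d.getD i 0 = v := by
  simp only [PySem.Dict.getD, PySem.Dict.get?, hits, find?_append_fresh h]
  rfl

theorem contains_append_fresh (d : PySem.Dict Int Int) (xs : List (Int × Int)) (i v : Int)
    (hits : d.items = xs ++ [(i, v)]) : d.contains i = true := by
  simp only [PySem.Dict.contains, hits, List.any_append]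
  simp

theorem modify_append_fresh (d : PySem.Dict Int Int) (xs : List (Int × Int)) (i v a : Int)
    (hits : d.items = xs ++ [(i, v)]) (h : ∀ x ∈ xs, x.1 ≠ i) :
    (d.modify i 0 (· + a)).items = xs ++ [(i, v + a)] := by
  simp only [PySem.Dict.modify, PySem.Dict.insert, contains_append_fresh d xs i v hits,
    if_true, getD_append_fresh d xs i v hits h, hits, List.map_append]
  congr 1
  · conv_rhs => rw [← List.map_id xs]
    refine List.map_congr_left ?_
    intro x hx
    simp [h x hx]
  · simp

theorem erase_append_fresh (d : PySem.Dict Int Int) (xs : List (Int × Int)) (i v : Int)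
    (hits : d.items = xs ++ [(i, v)]) (h : ∀ x ∈ xs, x.1 ≠ i) :
    (d.erase i).items = xs := by
  simp only [PySem.Dict.erase, hits, List.filter_append]
  have h1 : xs.filter (fun p => !p.1 == i) = xs := by
    rw [List.filter_eq_self]
    intro x hx; simpa using h x hx
  rw [h1]; simp

theorem foldl_modify_sum (i t1 t2 : Int) (l : List Int) :
    ∀ (d : PySem.Dict Int Int) (xs : List (Int × Int)) (v : Int),
      d.items = xs ++ [(i, v)] → (∀ x ∈ xs, x.1 ≠ i) →
      (l.foldl (fun r j =>
          if j < t1 then r.modify i 0 (· + (-1) * pvCant i j * i)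
          else if t2 ≤ j then r.modify i 0 (· + 1 * pvCant i j * i)
          else r) d).items = xs ++ [(i, v + (l.map (hF i t1 t2)).sum)] := by
  induction l with
  | nil => intro d xs v hits h; simpa using hits
  | cons j l ih =>
    intro d xs v hits h
    rw [List.foldl_cons, List.map_cons, List.sum_cons]
    by_cases h1 : j < t1
    · rw [if_pos h1]
      have := ih (d.modify i 0 (· + (-1) * pvCant i j * i)) xs (v + (-1) * pvCant i j * i)
        (modify_append_fresh d xs i v _ hits h) h
      rw [this, hF, if_pos h1, add_assoc]
    · rw [if_neg h1]
      by_cases h2 : t2 ≤ j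
      · rw [if_pos h2]
        have := ih (d.modify i 0 (· + 1 * pvCant i j * i)) xs (v + 1 * pvCant i j * i)
          (modify_append_fresh d xs i v _ hits h) h
        rw [this, hF, if_neg h1, if_pos h2, add_assoc]
      · rw [if_neg h2]
        have := ih d xs v hits h
        rw [this, hF, if_neg h1, if_neg h2, zero_add]

theorem comp_test (n m : Int) (h2 : 2 ≤ m) (hmn : m ≤ n) (bigstart : Bool) :
    (∃ q : Int, 2 ≤ q ∧ q < m ∧ Nat.Prime q.toNat ∧ q ∣ m ∧
        (if bigstart then q*q ≤ m else 2*q ≤ m) ∧ m ≤ n)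
      ↔ ¬ Nat.Prime m.toNat := by
  constructor
  · rintro ⟨q, hq2, hqm, hqp, hqd, -, -⟩ hmp
    have hq0 : (0:Int) ≤ q := by omega
    have hm0 : (0:Int) ≤ m := by omega
    have hQM : q.toNat ∣ m.toNat := by
      rcases hqd with ⟨c, hc⟩
      have hc0 : (0:Int) ≤ c := by
        by_contra hcneg
        nlinarith
      refine ⟨c.toNat, ?_⟩
      have hcast : (m.toNat : Int) = ((q.toNat * c.toNat : Nat) : Int) := by
        push_cast
        rw [Int.toNat_of_nonneg hm0, Int.toNat_of_nonneg hq0, Int.toNat_of_nonneg hc0]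
        exact hc
      exact_mod_cast hcast
    rcases (Nat.Prime.eq_one_or_self_of_dvd hmp _ hQM) with h | h
    · omega
    · omega
  · intro hmp
    have hm2 : 2 ≤ m.toNat := by omega
    set Q := m.toNat.minFac with hQdef
    have hQp : Nat.Prime Q := Nat.minFac_prime (by omega)
    have hQd : Q ∣ m.toNat := Nat.minFac_dvd _
    have hQm : Q < m.toNat := by
      rcases Nat.lt_or_ge Q m.toNat with h | h
      · exact h
      · have hle : Q ≤ m.toNat := Nat.le_of_dvd (by omega) hQd
        have : Q = m.toNat := by omega
        rw [this] at hQp; exact absurd hQp hmp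
    refine ⟨(Q : Int), by exact_mod_cast hQp.two_le, ?_, by simp [Int.toNat_natCast]; exact hQp, ?_, ?_, hmn⟩
    · omega
    · have : (Q:Int) ∣ (m.toNat : Int) := Int.natCast_dvd_natCast.2 hQd
      rwa [Int.toNat_of_nonneg (by omega)] at this
    · by_cases hb : bigstart
      · rw [if_pos hb]
        have := Nat.minFac_sq_le_self (n := m.toNat) (by omega) hmp
        rw [pow_two] at this
        have : ((Q*Q : Nat) : Int) ≤ ((m.toNat : Nat) : Int) := by exact_mod_cast this
        push_cast at this
        omega
      · rw [if_neg hb]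
        rcases hQd with ⟨c, hc⟩
        have hc2 : 2 ≤ c := by
          rcases Nat.lt_or_ge c 2 with h | h
          · interval_cases c
            · omega
            · rw [hc, Nat.mul_one] at hQm; omega
          · exact h
        have : 2*Q ≤ m.toNat := by
          calc 2*Q = Q*2 := by ring
          _ ≤ Q*c := Nat.mul_le_mul_left Q hc2
          _ = m.toNat := hc.symm
        have : ((2*Q : Nat) : Int) ≤ (m.toNat : Int) := by exact_mod_cast this
        push_cast at this
        omega

def eB (n k p : Int) : Int :=
  pvLegendre n p - pvLegendre (max (n - k) k) p - pvLegendre (min (n - k) k) p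

theorem eB_closed' (N K P : Nat) (hkn : K ≤ N) (hp2 : 2 ≤ P) :
    eB (N:Int) (K:Int) (P:Int)
      = (sN P N : Int) - (sN P (max (N-K) K) : Int) - (sN P (min (N-K) K) : Int) := by
  have hsub : ((N:Int) - (K:Int)) = ((N - K : Nat) : Int) := by push_cast [hkn]; ring
  have hmin : min ((N:Int) - (K:Int)) (K:Int) = ((min (N-K) K : Nat) : Int) := by
    rw [hsub]; push_cast; rfl
  have hmax : max ((N:Int) - (K:Int)) (K:Int) = ((max (N-K) K : Nat) : Int) := by
    rw [hsub]; push_cast; rfl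
  rw [eB, hmin, hmax, pvLegendre_eq N P hp2, pvLegendre_eq _ P hp2, pvLegendre_eq _ P hp2,
    lN_eq_sN P hp2, lN_eq_sN P hp2, lN_eq_sN P hp2]

theorem valA_bad (n k p : Int) (hp : 2 ≤ p) (hpn : p ≤ n) (hbad : k < 0 ∨ n < k) :
    valA n k p = 0 := by
  have ht1 : min (n - k) k + 1 ≤ 0 := by
    rcases hbad with h | h
    · have := min_le_right (n - k) k; omega
    · have := min_le_left (n - k) k; omega
  have ht2 : n + 2 ≤ max (n - k) k + 1 := by
    rcases hbad with h | h
    · have := le_max_left (n - k) k; omega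
    · have := le_max_right (n - k) k; omega
  rw [valA]
  have hinit : (if p < min (n-k) k + 1 then -p else if p < max (n-k) k + 1 then 0 else p) = 0 := by
    rw [if_neg (by omega), if_pos (by omega)]
  have hzero : ((PySem.List.pyRange (p*2) (n+1) p).map
      (hF p (min (n-k) k + 1) (max (n-k) k + 1))).sum = 0 := by
    apply List.sum_eq_zero
    intro x hx
    rcases List.mem_map.1 hx with ⟨j, hj, rfl⟩
    rcases (PySem.List.mem_pyRange_iff_of_pos (by omega) j).1 hj with ⟨hj1, hj2, -⟩
    rw [hF, if_neg (by omega), if_neg (by omega)]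
  rw [hinit, hzero]
  simp

def entryA (n k p : Int) : List (Int × Int) :=
  if 2 ≤ p ∧ Nat.Prime p.toNat ∧ valA n k p ≠ 0 then [(p, valA n k p)] else []

def stepA (n k : Int) (st : PySem.Dict Int Int × PySem.Set Int) (i : Int) :
    PySem.Dict Int Int × PySem.Set Int :=
  if st.2.contains i then st
  else
    let r := st.1.insert i (if i < min (n-k) k + 1 then -i else if i < max (n-k) k + 1 then 0 else i)
    let st2 := (PySem.List.pyRange (i*2) (n+1) i).foldl
      (fun st2 j =>
        let np := st2.2.add j
        if j < min (n-k) k + 1 then (st2.1.modify i 0 (· + (-1) * pvCant i j * i), np)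
        else if max (n-k) k + 1 ≤ j then (st2.1.modify i 0 (· + 1 * pvCant i j * i), np)
        else (st2.1, np)) (r, st.2)
    if st2.1.getD i 0 = 0 then (st2.1.erase i, st2.2) else st2

theorem get_factorisation_eq_fold (n k : Int) :
    get_factorisation n k
      = ((PySem.List.pyRange 2 (n+1) 1).foldl (stepA n k)
          (PySem.Dict.empty, PySem.Set.empty)).1.items := rfl

def sievedA (n m x : Int) : Prop :=
  ∃ q : Int, 2 ≤ q ∧ q < m ∧ Nat.Prime q.toNat ∧ q ∣ x ∧ 2*q ≤ x ∧ x ≤ n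

theorem mem_entryA {n k p : Int} {x : Int × Int} (h : x ∈ entryA n k p) : x.1 = p := by
  unfold entryA at h
  split_ifs at h
  · rcases List.mem_singleton.1 h with rfl; rfl
  · cases h

theorem A_inv (n k : Int) (_hn : 2 ≤ n) :
    ∀ t : Nat, 2 + (t:Int) ≤ n + 1 →
      (((PySem.List.pyRange 2 (2 + (t:Int)) 1).foldl (stepA n k)
          (PySem.Dict.empty, PySem.Set.empty)).1.items
        = (PySem.List.pyRange 2 (2 + (t:Int)) 1).flatMap (entryA n k))
      ∧ (∀ x : Int,
          x ∈ ((PySem.List.pyRange 2 (2 + (t:Int)) 1).foldl (stepA n k)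
            (PySem.Dict.empty, PySem.Set.empty)).2 ↔ sievedA n (2 + (t:Int)) x) := by
  intro t
  induction t with
  | zero =>
    intro _
    rw [show ((0:Nat):Int) = 0 from rfl, add_zero, PySem.List.pyRange_one_eq_nil le_rfl]
    constructor
    · rfl
    · intro x
      constructor
      · intro h; cases h
      · rintro ⟨q, h1, h2, -⟩; omega
  | succ t ih =>
    intro hle
    have hcast : (((t+1:Nat)):Int) = (t:Int) + 1 := by push_cast; ring
    rw [hcast, show (2 + ((t:Int)+1)) = (2 + (t:Int)) + 1 by ring] at *
    set m := 2 + (t:Int) with hmdef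
    have hm2 : 2 ≤ m := by omega
    have hmn : m ≤ n := by omega
    obtain ⟨ih1, ih2⟩ := ih (by omega)
    rw [PySem.List.pyRange_one_succ_right (by omega : (2:Int) ≤ m), List.foldl_append,
      List.foldl_cons, List.foldl_nil, List.flatMap_append]
    set st := (PySem.List.pyRange 2 m 1).foldl (stepA n k) (PySem.Dict.empty, PySem.Set.empty)
      with hstdef
    by_cases hprime : Nat.Prime m.toNat
    · -- m survives the sieve: A computes its entry and marks its multiples
      have hnotmem : ¬ m ∈ st.2 := by
        intro hmem
        exact ((comp_test n m hm2 hmn false).1 (by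
          rcases (ih2 m).1 hmem with ⟨q, hq⟩
          exact ⟨q, hq.1, hq.2.1, hq.2.2.1, hq.2.2.2.1, by simpa using hq.2.2.2.2.1, hq.2.2.2.2.2⟩)) hprime
      have hcont : st.2.contains m = false := by
        rw [← Bool.not_eq_true, PySem.Set.contains_iff]; exact hnotmem
      have hfresh : ∀ x ∈ st.1.items, x.1 ≠ m := by
        intro x hx
        rw [ih1] at hx
        rcases List.mem_flatMap.1 hx with ⟨p, hp, hxp⟩
        rcases (PySem.List.mem_pyRange_one).1 hp with ⟨-, hplt⟩
        rw [mem_entryA hxp]; omega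
      have hcont1 : st.1.contains m = false := by
        apply List.any_eq_false.mpr
        intro x hx; simpa using hfresh x hx
      rw [stepA, hcont, if_neg (by simp)]
      dsimp only []
      have hins : (st.1.insert m (if m < min (n-k) k + 1 then -m
          else if m < max (n-k) k + 1 then 0 else m)).items
          = st.1.items ++ [(m, if m < min (n-k) k + 1 then -m
              else if m < max (n-k) k + 1 then 0 else m)] :=
        PySem.Dict.items_insert_of_not_contains _ _ hcont1
      have hfun : (fun (st2 : PySem.Dict Int Int × PySem.Set Int) j =>
            let np := st2.2.add j
            if j < min (n-k) k + 1 then (st2.1.modify m 0 (· + (-1) * pvCant m j * m), np)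
            else if max (n-k) k + 1 ≤ j then (st2.1.modify m 0 (· + 1 * pvCant m j * m), np)
            else (st2.1, np))
          = (fun (st2 : PySem.Dict Int Int × PySem.Set Int) j =>
              (if j < min (n-k) k + 1 then st2.1.modify m 0 (· + (-1) * pvCant m j * m)
               else if max (n-k) k + 1 ≤ j then st2.1.modify m 0 (· + 1 * pvCant m j * m)
               else st2.1,
               st2.2.add j)) := by
        funext st2 j
        simp only []
        split_ifs <;> rfl
      rw [hfun, PySem.List.foldl_prod_mk
        (f := fun (r : PySem.Dict Int Int) j =>
          if j < min (n-k) k + 1 then r.modify m 0 (· + (-1) * pvCant m j * m)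
          else if max (n-k) k + 1 ≤ j then r.modify m 0 (· + 1 * pvCant m j * m)
          else r)
        (g := fun (s : PySem.Set Int) (j : Int) => s.add j)]
      have hrpart := foldl_modify_sum m (min (n-k) k + 1) (max (n-k) k + 1)
        (PySem.List.pyRange (m*2) (n+1) m) _ st.1.items _ hins hfresh
      have hval : (if m < min (n-k) k + 1 then -m else if m < max (n-k) k + 1 then 0 else m)
          + ((PySem.List.pyRange (m*2) (n+1) m).map
              (hF m (min (n-k) k + 1) (max (n-k) k + 1))).sum = valA n k m := by
        simp only [valA]
      have hsetpart : ∀ x : Int,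
          x ∈ (PySem.List.pyRange (m*2) (n+1) m).foldl
                (fun (s : PySem.Set Int) (j : Int) => s.add j) st.2
            ↔ sievedA n (m+1) x := by
        intro x
        rw [show (fun (s : PySem.Set Int) (j : Int) => s.add j)
            = (fun (s : PySem.Set Int) (j : Int) => s.add ((fun (b : Int) => b) j)) from rfl]
        rw [PySem.Set.mem_foldl_add]
        constructor
        · rintro (hold | ⟨j, hj, hxj⟩)
          · rcases (ih2 x).1 hold with ⟨q, hq⟩
            exact ⟨q, hq.1, by omega, hq.2.2.1, hq.2.2.2.1, hq.2.2.2.2.1, hq.2.2.2.2.2⟩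
          · subst hxj
            rcases (PySem.List.mem_pyRange_iff_of_pos (by omega) x).1 hj with ⟨hj1, hj2, hj3⟩
            refine ⟨m, hm2, by omega, hprime, ?_, by omega, by omega⟩
            have : m ∣ (x - m*2) + m*2 := Dvd.dvd.add hj3 ⟨2, rfl⟩
            simpa using this
        · rintro ⟨q, hq2, hqm1, hqp, hqd, hq2x, hxn⟩
          by_cases hqlt : q < m
          · exact Or.inl ((ih2 x).2 ⟨q, hq2, hqlt, hqp, hqd, hq2x, hxn⟩)
          · have hqeq : q = m := by omega
            refine Or.inr ⟨x, ?_, rfl⟩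
            rw [PySem.List.mem_pyRange_iff_of_pos (by omega)]
            rw [hqeq] at hqd hq2x
            exact ⟨by omega, by omega, by
              have : m ∣ x - m*2 := (Dvd.dvd.sub hqd ⟨2, rfl⟩)
              simpa using this⟩
      have hgetD : ((PySem.List.pyRange (m*2) (n+1) m).foldl
            (fun (r : PySem.Dict Int Int) j =>
              if j < min (n-k) k + 1 then r.modify m 0 (· + (-1) * pvCant m j * m)
              else if max (n-k) k + 1 ≤ j then r.modify m 0 (· + 1 * pvCant m j * m)
              else r) (st.1.insert m (if m < min (n-k) k + 1 then -m
                else if m < max (n-k) k + 1 then 0 else m))).getD m 0 = valA n k m := by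
        rw [getD_append_fresh _ st.1.items m _ (by rw [hrpart, hval]) hfresh]
      by_cases hz : valA n k m = 0
      · rw [if_pos (by rw [hgetD, hz])]
        constructor
        · simp only []
          rw [erase_append_fresh _ st.1.items m (valA n k m) (by rw [hrpart, hval]) hfresh,
            ih1]
          simp [entryA, hz]
        · intro x
          simpa using hsetpart x
      · rw [if_neg (by rw [hgetD]; exact hz)]
        constructor
        · simp only []
          rw [hrpart, hval, ih1]
          simp [entryA, hm2, hprime, hz]
        · intro x
          simpa using hsetpart x
    · -- m was already marked composite: the state does not change
      have hmem : m ∈ st.2 := by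
        apply (ih2 m).2
        rcases (comp_test n m hm2 hmn false).2 hprime with ⟨q, hq1, hq2, hq3, hq4, hq5, hq6⟩
        exact ⟨q, hq1, hq2, hq3, hq4, by simpa using hq5, hq6⟩
      have hcont : st.2.contains m = true := (PySem.Set.contains_iff _ _).2 hmem
      rw [stepA, hcont, if_pos rfl]
      constructor
      · rw [ih1]
        simp [entryA, hprime]
      · intro x
        rw [ih2 x]
        constructor
        · rintro ⟨q, hq⟩
          exact ⟨q, hq.1, by omega, hq.2.2⟩
        · rintro ⟨q, hq1, hq2, hq3, hq⟩
          refine ⟨q, hq1, ?_, hq3, hq⟩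
          by_contra hcon
          have : q = m := by omega
          subst this
          exact hprime hq3

def entryB (n k p : Int) : List (Int × Int) :=
  if 2 ≤ p ∧ Nat.Prime p.toNat ∧ eB n k p ≠ 0 then [(p, p * eB n k p)] else []

def stepB (n k : Int) (st : PySem.Dict Int Int × PySem.Set Int) (p : Int) :
    PySem.Dict Int Int × PySem.Set Int :=
  if st.2.contains p then st
  else
    let e := pvLegendre n p - pvLegendre (max (n-k) k) p - pvLegendre (min (n-k) k) p
    let r := if e ≠ 0 then st.1.insert p (p * e) else st.1
    let comp := (PySem.List.pyRange (p*p) (n+1) p).foldl (fun s j => PySem.Set.add s j) st.2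
    (r, comp)

theorem alt_eq_fold (n k : Int) (h : ¬ (n < 2 ∨ k < 0 ∨ n < k)) :
    get_factorisation_alt n k
      = ((PySem.List.pyRange 2 (n+1) 1).foldl (stepB n k)
          (PySem.Dict.empty, PySem.Set.empty)).1.items := by
  rw [get_factorisation_alt, if_neg h]
  rfl

def sievedB (n m x : Int) : Prop :=
  ∃ q : Int, 2 ≤ q ∧ q < m ∧ Nat.Prime q.toNat ∧ q ∣ x ∧ q*q ≤ x ∧ x ≤ n

theorem mem_entryB {n k p : Int} {x : Int × Int} (h : x ∈ entryB n k p) : x.1 = p := by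
  unfold entryB at h
  split_ifs at h
  · rcases List.mem_singleton.1 h with rfl; rfl
  · cases h

theorem B_inv (n k : Int) (_hn : 2 ≤ n) :
    ∀ t : Nat, 2 + (t:Int) ≤ n + 1 →
      (((PySem.List.pyRange 2 (2 + (t:Int)) 1).foldl (stepB n k)
          (PySem.Dict.empty, PySem.Set.empty)).1.items
        = (PySem.List.pyRange 2 (2 + (t:Int)) 1).flatMap (entryB n k))
      ∧ (∀ x : Int,
          x ∈ ((PySem.List.pyRange 2 (2 + (t:Int)) 1).foldl (stepB n k)
            (PySem.Dict.empty, PySem.Set.empty)).2 ↔ sievedB n (2 + (t:Int)) x) := by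
  intro t
  induction t with
  | zero =>
    intro _
    rw [show ((0:Nat):Int) = 0 from rfl, add_zero, PySem.List.pyRange_one_eq_nil le_rfl]
    constructor
    · rfl
    · intro x
      constructor
      · intro h; cases h
      · rintro ⟨q, h1, h2, -⟩; omega
  | succ t ih =>
    intro hle
    have hcast : (((t+1:Nat)):Int) = (t:Int) + 1 := by push_cast; ring
    rw [hcast, show (2 + ((t:Int)+1)) = (2 + (t:Int)) + 1 by ring] at *
    set m := 2 + (t:Int) with hmdef
    have hm2 : 2 ≤ m := by omega
    have hmn : m ≤ n := by omega
    obtain ⟨ih1, ih2⟩ := ih (by omega)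
    rw [PySem.List.pyRange_one_succ_right (by omega : (2:Int) ≤ m), List.foldl_append,
      List.foldl_cons, List.foldl_nil, List.flatMap_append]
    set st := (PySem.List.pyRange 2 m 1).foldl (stepB n k) (PySem.Dict.empty, PySem.Set.empty)
      with hstdef
    have hsetpart : ∀ x : Int,
        x ∈ (PySem.List.pyRange (m*m) (n+1) m).foldl
              (fun (s : PySem.Set Int) (j : Int) => s.add j) st.2
          ↔ (x ∈ st.2 ∨ (m ∣ x ∧ m*m ≤ x ∧ x ≤ n)) := by
      intro x
      rw [show (fun (s : PySem.Set Int) (j : Int) => s.add j)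
          = (fun (s : PySem.Set Int) (j : Int) => s.add ((fun (b : Int) => b) j)) from rfl]
      rw [PySem.Set.mem_foldl_add]
      constructor
      · rintro (hold | ⟨j, hj, hxj⟩)
        · exact Or.inl hold
        · subst hxj
          rcases (PySem.List.mem_pyRange_iff_of_pos (by omega) x).1 hj with ⟨hj1, hj2, hj3⟩
          refine Or.inr ⟨?_, by omega, by omega⟩
          have : m ∣ (x - m*m) + m*m := Dvd.dvd.add hj3 ⟨m, rfl⟩
          simpa using this
      · rintro (hold | ⟨hdvd, hmm, hxn⟩)
        · exact Or.inl hold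
        · refine Or.inr ⟨x, ?_, rfl⟩
          rw [PySem.List.mem_pyRange_iff_of_pos (by omega)]
          exact ⟨by omega, by omega, Dvd.dvd.sub hdvd ⟨m, rfl⟩⟩
    by_cases hprime : Nat.Prime m.toNat
    · have hnotmem : ¬ m ∈ st.2 := by
        intro hmem
        exact ((comp_test n m hm2 hmn true).1 (by
          rcases (ih2 m).1 hmem with ⟨q, hq⟩
          exact ⟨q, hq.1, hq.2.1, hq.2.2.1, hq.2.2.2.1, by simpa using hq.2.2.2.2.1, hq.2.2.2.2.2⟩)) hprime
      have hcont : st.2.contains m = false := by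
        rw [← Bool.not_eq_true, PySem.Set.contains_iff]; exact hnotmem
      have hfresh : ∀ x ∈ st.1.items, x.1 ≠ m := by
        intro x hx
        rw [ih1] at hx
        rcases List.mem_flatMap.1 hx with ⟨p, hp, hxp⟩
        rcases (PySem.List.mem_pyRange_one).1 hp with ⟨-, hplt⟩
        rw [mem_entryB hxp]; omega
      have hcont1 : st.1.contains m = false := by
        apply List.any_eq_false.mpr
        intro x hx; simpa using hfresh x hx
      rw [stepB, hcont, if_neg (by simp)]
      dsimp only []
      constructor
      · rw [show (pvLegendre n m - pvLegendre (max (n-k) k) m - pvLegendre (min (n-k) k) m)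
            = eB n k m from rfl]
        by_cases hz : eB n k m = 0
        · rw [if_neg (by simp [hz]), ih1]
          simp [entryB, hz]
        · rw [if_pos hz, PySem.Dict.items_insert_of_not_contains _ _ hcont1, ih1]
          simp [entryB, hm2, hprime, hz]
      · intro x
        rw [hsetpart x]
        constructor
        · rintro (hold | ⟨hdvd, hmm, hxn⟩)
          · rcases (ih2 x).1 hold with ⟨q, hq⟩
            exact ⟨q, hq.1, by omega, hq.2.2⟩
          · exact ⟨m, hm2, by omega, hprime, hdvd, hmm, hxn⟩
        · rintro ⟨q, hq2, hqm1, hqp, hqd, hqqx, hxn⟩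
          by_cases hqlt : q < m
          · exact Or.inl ((ih2 x).2 ⟨q, hq2, hqlt, hqp, hqd, hqqx, hxn⟩)
          · have hqeq : q = m := by omega
            rw [hqeq] at hqd hqqx
            exact Or.inr ⟨hqd, hqqx, hxn⟩
    · have hmem : m ∈ st.2 := by
        apply (ih2 m).2
        rcases (comp_test n m hm2 hmn true).2 hprime with ⟨q, hq1, hq2, hq3, hq4, hq5, hq6⟩
        exact ⟨q, hq1, hq2, hq3, hq4, by simpa using hq5, hq6⟩
      have hcont : st.2.contains m = true := (PySem.Set.contains_iff _ _).2 hmem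
      rw [stepB, hcont, if_pos rfl]
      constructor
      · rw [ih1]
        simp [entryB, hprime]
      · intro x
        rw [ih2 x]
        constructor
        · rintro ⟨q, hq⟩
          exact ⟨q, hq.1, by omega, hq.2.2⟩
        · rintro ⟨q, hq1, hq2, hq3, hq⟩
          refine ⟨q, hq1, ?_, hq3, hq⟩
          by_contra hcon
          have : q = m := by omega
          rw [this] at hq3
          exact hprime hq3

theorem A_items (n k : Int) :
    get_factorisation n k = (PySem.List.pyRange 2 (n+1) 1).flatMap (entryA n k) := by
  by_cases hn : n ≤ 1
  · rw [get_factorisation_eq_fold, PySem.List.pyRange_one_eq_nil (by omega)]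
    rfl
  · have hn2 : 2 ≤ n := by omega
    have hcast : (2 + (((n-1).toNat : Nat) : Int)) = n + 1 := by omega
    have := (A_inv n k hn2 (n-1).toNat (by omega)).1
    rwa [hcast] at this

theorem B_items (n k : Int) (h : ¬ (n < 2 ∨ k < 0 ∨ n < k)) :
    get_factorisation_alt n k = (PySem.List.pyRange 2 (n+1) 1).flatMap (entryB n k) := by
  have hn2 : 2 ≤ n := by omega
  have hcast : (2 + (((n-1).toNat : Nat) : Int)) = n + 1 := by omega
  have hh := (B_inv n k hn2 (n-1).toNat (by omega)).1
  rw [hcast] at hh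
  rw [alt_eq_fold n k h, hh]

theorem flatMap_congr_mem {α β : Type} (l : List α) (f g : α → List β)
    (h : ∀ x ∈ l, f x = g x) : l.flatMap f = l.flatMap g := by
  induction l with
  | nil => rfl
  | cons a l ih =>
    rw [List.flatMap_cons, List.flatMap_cons, h a (by simp), ih (fun x hx => h x (by simp [hx]))]

theorem val_eq (n k p : Int) (hn : 2 ≤ n) (hk0 : 0 ≤ k) (hkn : k ≤ n)
    (hp2 : 2 ≤ p) (hpn : p ≤ n) : valA n k p = p * eB n k p := by
  have hN : n = ((n.toNat : Nat) : Int) := (Int.toNat_of_nonneg (by omega)).symm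
  have hK : k = ((k.toNat : Nat) : Int) := (Int.toNat_of_nonneg (by omega)).symm
  have hP : p = ((p.toNat : Nat) : Int) := (Int.toNat_of_nonneg (by omega)).symm
  rw [hN, hK, hP]
  rw [valA_closed' n.toNat k.toNat p.toNat (by omega) (by omega) (by omega) (by omega),
    eB_closed' n.toNat k.toNat p.toNat (by omega) (by omega)]

theorem main_spec (n k : Int) : get_factorisation n k = get_factorisation_alt n k := by
  by_cases hbad : n < 2 ∨ k < 0 ∨ n < k
  · rw [get_factorisation_alt, if_pos hbad, A_items]
    apply List.flatMap_eq_nil_iff.2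
    intro p hp
    rcases (PySem.List.mem_pyRange_one).1 hp with ⟨hp2, hplt⟩
    by_cases hn2 : 2 ≤ n
    · rcases hbad with h | h
      · omega
      · rw [entryA, if_neg]
        rintro ⟨-, -, hv⟩
        exact hv (valA_bad n k p hp2 (by omega) (by omega))
    · omega
  · have hn2 : 2 ≤ n := by omega
    rw [A_items, B_items n k hbad]
    apply flatMap_congr_mem
    intro p hp
    rcases (PySem.List.mem_pyRange_one).1 hp with ⟨hp2, hplt⟩
    rw [entryA, entryB, val_eq n k p hn2 (by omega) (by omega) hp2 (by omega)]
    refine if_congr ?_ rfl rfl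
    refine and_congr_right fun _ => and_congr_right fun _ => ?_
    constructor
    · intro h hz; exact h (by rw [hz, mul_zero])
    · intro h hz
      rcases mul_eq_zero.1 hz with h0 | h0
      · omega
      · exact h h0

-- ===== VERDICT (by name: the statement is the Claim_ definition above) =====
theorem get_factorisation_spec : Claim_equal_get_factorisation := by
  intro n k _
  unfold Spec_get_factorisation
  exact main_spec n k
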